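-- pv_equiv track=rewrite | github.com/CesarJimenezVilleda02/experiments-interviewpractice-cybersecurity | Interesting-ideas/Convertir tecto a lenguaje EFE.py | toEFE
-- ===== SOURCE A (Python) =====
-- pruebas = "aeiou"
--
-- def toEFE(chars):
--     charF = ""
--     for i in chars:
--         for j in pruebas:
--             if (i == j):
--                 charF = charF + j + "f"
--         charF = charF + i
--     return charF
-- ===== SOURCE B (Python) =====
-- def toEFE(chars):
--     # staged passes: one whole-string replace per vowel, mapping v to v+"f"+v;
--     # passes do not interfere: a pass only inserts v and 'f', 'f' is no vowel,
--     # and replace never rescans its own insertions.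
--     for v in "aeiou":
--         chars = chars.replace(v, v + "f" + v)
--     return chars
-- ===== Notes on version B (the rewrite author's own statement) =====
-- stated objective: faster
-- what changed: Replaces A's single left-to-right character loop with a nested scan over the vowel string and a growing string accumulator by five staged whole-string str.replace passes, one per vowel mapping it to vowel+marker+vowel; the passes commute because a pass inserts only its own vowel and the non-vowel marker.
import Mathlib
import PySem

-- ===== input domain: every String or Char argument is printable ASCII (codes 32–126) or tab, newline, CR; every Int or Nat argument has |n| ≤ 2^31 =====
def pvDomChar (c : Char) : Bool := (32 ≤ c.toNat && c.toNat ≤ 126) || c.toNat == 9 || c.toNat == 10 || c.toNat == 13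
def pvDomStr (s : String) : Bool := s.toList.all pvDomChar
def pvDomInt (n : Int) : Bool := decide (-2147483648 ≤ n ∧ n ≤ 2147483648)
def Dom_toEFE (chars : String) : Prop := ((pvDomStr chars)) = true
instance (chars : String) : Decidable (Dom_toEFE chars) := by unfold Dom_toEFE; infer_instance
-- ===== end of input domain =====

-- faster: B replaces A's single character loop (nested scan over "aeiou", growing string
-- accumulator) by five staged whole-string replace passes, one per vowel (v -> v+"f"+v).

-- ===== PORT A =====
-- literal port: outer loop over chars, inner loop over "aeiou", string accumulator charF
def toEFE (chars : String) : String :=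
  String.mk
    (chars.toList.foldl
      (fun charF i =>
        ("aeiou".toList.foldl
          (fun charF j => if i == j then charF ++ [j] ++ ['f'] else charF)
          charF) ++ [i])
      [])

-- ===== PORT B =====
-- staged passes: for v in "aeiou": chars = chars.replace(v, v + "f" + v)
def toEFE_alt (chars : String) : String :=
  String.mk
    ("aeiou".toList.foldl
      (fun s v => PySem.Chars.replace s [v] ([v] ++ ['f'] ++ [v]))
      chars.toList)

-- ===== PRECONDITION & SPEC =====
def Spec_toEFE (chars : String) (out : String) : Prop := out = toEFE_alt chars
instance (chars : String) (out : String) : Decidable (Spec_toEFE chars out) := by unfold Spec_toEFE; infer_instance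

-- ===== CLAIM (what is proved, stated in full; the proofs are below) =====
def Claim_equal_toEFE : Prop := ∀ (chars : String), Dom_toEFE chars → Spec_toEFE chars (toEFE chars)

-- ===== LEMMAS AND PROOFS =====

-- the common single-pass substitution both sides are reduced to
def efeSub (c : Char) : List Char :=
  if c = 'a' ∨ c = 'e' ∨ c = 'i' ∨ c = 'o' ∨ c = 'u' then [c, 'f', c] else [c]

-- Python replace with a single-character pattern is a flatMap
theorem replace_go_single (v : Char) (r : List Char) (l acc : List Char)
    (fuel : Nat) (h : l.length ≤ fuel) :
    PySem.Chars.replace.go [v] r fuel l acc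
      = acc.reverse ++ l.flatMap (fun c => if c = v then r else [c]) := by
  induction fuel generalizing l acc with
  | zero =>
      have : l = [] := List.eq_nil_of_length_eq_zero (Nat.le_zero.mp h)
      subst this; simp [PySem.Chars.replace.go]
  | succ n ih =>
      cases l with
      | nil => simp [PySem.Chars.replace.go]
      | cons c t =>
          rw [PySem.Chars.replace.go]
          by_cases hv : v = c
          · subst hv
            have hp : [v].isPrefixOf (v :: t) = true := by
              simp [List.isPrefixOf]
            simp only [hp, if_true]
            have hd : List.drop [v].length (v :: t) = t := by simp
            rw [hd, ih t (r.reverse ++ acc) (Nat.le_of_succ_le_succ h)]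
            simp
          · have hp : [v].isPrefixOf (c :: t) = false := by
              simp [List.isPrefixOf, hv]
            simp only [hp, Bool.false_eq_true, if_false]
            rw [ih t (c :: acc) (Nat.le_of_succ_le_succ h)]
            have hcv : ¬ c = v := fun hc => hv hc.symm
            simp [hcv]

theorem replace_single (v : Char) (r : List Char) (s : List Char) :
    PySem.Chars.replace s [v] r
      = s.flatMap (fun c => if c = v then r else [c]) := by
  rw [PySem.Chars.replace, if_neg (by simp)]
  exact replace_go_single v r s [] s.length (le_refl _) |>.trans (by simp)

-- A's inner vowel loop followed by appending the char is exactly efeSub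
theorem efeA_step (acc : List Char) (c : Char) :
    ("aeiou".toList.foldl
        (fun charF j => if c == j then charF ++ [j] ++ ['f'] else charF)
        acc) ++ [c]
      = acc ++ efeSub c := by
  have h5 : "aeiou".toList = ['a', 'e', 'i', 'o', 'u'] := by decide
  simp only [h5, efeSub]
  by_cases ha : c = 'a'
  · subst ha; simp [List.foldl]
  by_cases he : c = 'e'
  · subst he; simp [List.foldl]
  by_cases hi : c = 'i'
  · subst hi; simp [List.foldl]
  by_cases ho : c = 'o'
  · subst ho; simp [List.foldl]
  by_cases hu : c = 'u'
  · subst hu; simp [List.foldl]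
  · have b1 : (c == 'a') = false := by simp [ha]
    have b2 : (c == 'e') = false := by simp [he]
    have b3 : (c == 'i') = false := by simp [hi]
    have b4 : (c == 'o') = false := by simp [ho]
    have b5 : (c == 'u') = false := by simp [hu]
    simp [List.foldl, b1, b2, b3, b4, b5, ha, he, hi, ho, hu]

theorem efeA_fold (l : List Char) (acc : List Char) :
    l.foldl
      (fun charF i =>
        ("aeiou".toList.foldl
          (fun charF j => if i == j then charF ++ [j] ++ ['f'] else charF)
          charF) ++ [i])
      acc
      = acc ++ l.flatMap efeSub := by
  induction l generalizing acc with
  | nil => simp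
  | cons c t ih =>
      simp only [List.foldl_cons, List.flatMap_cons]
      rw [ih, efeA_step, List.append_assoc]

-- B's five staged replace passes over one character give exactly efeSub on it
theorem efeB_char (c : Char) :
    ("aeiou".toList.foldl
        (fun s v => s.flatMap (fun x => if x = v then [v] ++ ['f'] ++ [v] else [x]))
        [c])
      = efeSub c := by
  have h5 : "aeiou".toList = ['a', 'e', 'i', 'o', 'u'] := by decide
  simp only [h5, efeSub]
  by_cases ha : c = 'a'
  · subst ha; decide
  by_cases he : c = 'e'
  · subst he; decide
  by_cases hi : c = 'i'
  · subst hi; decide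
  by_cases ho : c = 'o'
  · subst ho; decide
  by_cases hu : c = 'u'
  · subst hu; decide
  · simp [List.foldl, ha, he, hi, ho, hu]

-- the staged passes, as flatMaps, distribute over the character list
theorem efeB_fold (vs : List Char) (l : List Char) :
    vs.foldl
      (fun s v => s.flatMap (fun x => if x = v then [v] ++ ['f'] ++ [v] else [x]))
      l
      = l.flatMap (fun c =>
          vs.foldl
            (fun s v => s.flatMap (fun x => if x = v then [v] ++ ['f'] ++ [v] else [x]))
            [c]) := by
  induction vs generalizing l with
  | nil => simp
  | cons v t ih =>
      simp only [List.foldl_cons]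
      rw [ih]
      have hstep : ∀ c : Char,
          t.foldl
            (fun s v => s.flatMap (fun x => if x = v then [v] ++ ['f'] ++ [v] else [x]))
            ((fun x => if x = v then [v] ++ ['f'] ++ [v] else [x]) c)
          = ((fun x => if x = v then [v] ++ ['f'] ++ [v] else [x]) c).flatMap
              (fun c =>
                t.foldl
                  (fun s v => s.flatMap (fun x => if x = v then [v] ++ ['f'] ++ [v] else [x]))
                  [c]) := fun c => ih _
      simp only [List.flatMap_assoc]
      refine List.flatMap_congr (fun c _ => ?_)
      have := hstep c
      simpa using this.symm

-- the replace fold rewritten as the flatMap fold, pass by pass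
theorem fold_rep_eq (vs : List Char) (s : List Char) :
    vs.foldl (fun s v => PySem.Chars.replace s [v] ([v] ++ ['f'] ++ [v])) s
      = vs.foldl
          (fun s v => s.flatMap (fun x => if x = v then [v] ++ ['f'] ++ [v] else [x]))
          s := by
  induction vs generalizing s with
  | nil => rfl
  | cons v t ih =>
      simp only [List.foldl_cons]
      rw [replace_single, ih]

-- ===== VERDICT =====
theorem toEFE_spec : Claim_equal_toEFE := by
  intro chars _
  unfold Spec_toEFE toEFE toEFE_alt
  rw [efeA_fold, fold_rep_eq, efeB_fold]
  simp only [efeB_char]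
  simp
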